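-- pv_equiv track=rewrite | github.com/aivor7ex/qa-auto-cdm | mirada-agent/services/vswitch/utils_ping.py | _match_flag_with_value
-- ===== SOURCE A (Python) =====
-- from typing import Dict, Any, List, Optional
--
-- def _match_flag_with_value(args: List[str], flag: str, expected_value: str) -> bool:
--     """Проверяет наличие флага с ожидаемым значением в формате -flag value или -flagvalue."""
--     for i, arg in enumerate(args):
--         if arg == flag:
--             # Формат: -flag value
--             if i + 1 < len(args) and args[i + 1] == expected_value:
--                 return True
--         elif arg.startswith(flag) and len(arg) > len(flag):
--             # Формат: -flagvalue
--             if arg[len(flag):] == expected_value: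
--                 return True
--     return False
-- ===== SOURCE B (Python) =====
-- def _match_flag_with_value(args, flag, expected_value):
--     """Check if flag with expected value is present as '-flag value' or '-flagvalue'."""
--     if expected_value and (flag + expected_value) in args:
--         return True
--     return any(a == flag and b == expected_value for a, b in zip(args, args[1:]))
-- ===== Notes on version B (the rewrite author's own statement) =====
-- stated objective: idiomatic
-- what changed: Replaced the single indexed loop with two passes: a whole-list membership test for the concatenated flag+value form (guarded by non-empty expected_value) plus an any() over consecutive pairs via zip for the '-flag value' form.
import Mathlib
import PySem

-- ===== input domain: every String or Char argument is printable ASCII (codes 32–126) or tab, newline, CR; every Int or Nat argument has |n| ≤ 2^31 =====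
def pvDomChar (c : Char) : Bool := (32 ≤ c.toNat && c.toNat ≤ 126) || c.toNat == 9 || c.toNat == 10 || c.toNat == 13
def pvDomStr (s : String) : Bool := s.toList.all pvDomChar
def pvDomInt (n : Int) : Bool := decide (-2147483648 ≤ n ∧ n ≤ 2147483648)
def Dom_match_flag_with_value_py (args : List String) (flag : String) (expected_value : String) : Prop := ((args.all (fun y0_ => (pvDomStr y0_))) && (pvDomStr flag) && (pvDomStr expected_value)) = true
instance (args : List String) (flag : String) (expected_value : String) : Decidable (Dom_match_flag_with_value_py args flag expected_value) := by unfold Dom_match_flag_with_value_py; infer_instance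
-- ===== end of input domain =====

-- B replaces A's single indexed loop by a membership test for the concatenated
-- 'flag+value' form plus a pairwise zip pass for the '-flag value' form (idiomatic).

-- ===== PORT A =====
-- the loop body of A, recursing on the remaining args (args[i+1] is the head of rest)
def pvAGo (flag expected_value : String) : List String → Bool
  | [] => false
  | arg :: rest =>
    if arg = flag then
      -- Формат: -flag value
      (match rest with
       | nxt :: _ => if nxt = expected_value then true else pvAGo flag expected_value rest
       | [] => pvAGo flag expected_value rest)
    else if PySem.Str.startswith arg flag && decide (PySem.Str.len flag < PySem.Str.len arg) then
      -- Формат: -flagvalue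
      (if PySem.Str.slice arg (some (PySem.Str.len flag)) none = expected_value then true
       else pvAGo flag expected_value rest)
    else pvAGo flag expected_value rest

def match_flag_with_value_py (args : List String) (flag : String) (expected_value : String) : Bool :=
  pvAGo flag expected_value args

-- ===== PORT B =====
def match_flag_with_value_py_alt (args : List String) (flag : String) (expected_value : String) : Bool :=
  if expected_value ≠ "" && args.contains (flag ++ expected_value) then true
  else (args.zip args.tail).any (fun p => p.1 == flag && p.2 == expected_value)

-- ===== PRECONDITION & SPEC =====
def Spec_match_flag_with_value_py (args : List String) (flag : String) (expected_value : String) (out : Bool) : Prop := out = match_flag_with_value_py_alt args flag expected_value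
instance (args : List String) (flag : String) (expected_value : String) (out : Bool) : Decidable (Spec_match_flag_with_value_py args flag expected_value out) := by unfold Spec_match_flag_with_value_py; infer_instance

-- ===== CLAIM (what is proved, stated in full; the proofs are below) =====
def Claim_equal_match_flag_with_value_py : Prop := ∀ (args : List String) (flag : String) (expected_value : String), Dom_match_flag_with_value_py args flag expected_value → Spec_match_flag_with_value_py args flag expected_value (match_flag_with_value_py args flag expected_value)

-- ===== LEMMAS AND PROOFS =====

-- A's concatenated-form test on one arg, as a predicate
def pvCM (flag expected_value arg : String) : Bool :=
  (PySem.Str.startswith arg flag && decide (PySem.Str.len flag < PySem.Str.len arg))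
    && decide (PySem.Str.slice arg (some (PySem.Str.len flag)) none = expected_value)

-- The concatenated-form test is exactly 'expected_value nonempty and arg = flag ++ expected_value'
theorem pvCM_eq (flag expected_value arg : String) :
    pvCM flag expected_value arg
      = (decide (expected_value ≠ "") && (arg == flag ++ expected_value)) := by
  have hl : (PySem.Str.slice arg (some (PySem.Str.len flag)) none).toList
      = arg.toList.drop flag.toList.length := by
    simp [PySem.Str.len, PySem.List.slice_from_natCast]
  rw [Bool.eq_iff_iff]
  simp only [pvCM, Bool.and_eq_true, decide_eq_true_eq, beq_iff_eq, ne_eq]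
  constructor
  · rintro ⟨⟨h1, h2⟩, h3⟩
    rw [show PySem.Str.startswith arg flag = PySem.Chars.startswith arg.toList flag.toList from by simp,
      PySem.Chars.startswith_iff] at h1
    have h3' : arg.toList.drop flag.toList.length = expected_value.toList := by
      rw [← hl, h3]
    have h2' : flag.toList.length < arg.toList.length := by
      simp [PySem.Str.len] at h2; exact_mod_cast h2
    have harg : arg.toList = flag.toList ++ expected_value.toList := by
      rw [← h3']
      exact (List.prefix_iff_eq_append.mp h1).symm
    constructor
    · intro he
      have : expected_value.toList = [] := by rw [he]; rfl
      rw [harg, this] at h2'; simp at h2'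
    · rw [String.ext_iff]; simpa using harg
  · rintro ⟨he, harg⟩
    have he' : expected_value.toList ≠ [] := by
      intro h; exact he (String.ext_iff.mpr (by simpa using h))
    have harg' : arg.toList = flag.toList ++ expected_value.toList := by
      rw [harg]; simp
    refine ⟨⟨?_, ?_⟩, ?_⟩
    · rw [show PySem.Str.startswith arg flag = PySem.Chars.startswith arg.toList flag.toList from by simp,
        PySem.Chars.startswith_iff, harg']
      exact List.prefix_append _ _
    · have : flag.toList.length < arg.toList.length := by
        rw [harg']; simp
        exact List.length_pos_iff.mpr he'
      simp [PySem.Str.len]; exact_mod_cast this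
    · rw [String.ext_iff, hl, harg']
      simp

-- one unfolding step of A's loop
theorem pvAGo_cons (flag expected_value a : String) (rest : List String) :
    pvAGo flag expected_value (a :: rest)
      = (if a = flag then
           (match rest with
            | nxt :: _ => if nxt = expected_value then true else pvAGo flag expected_value rest
            | [] => pvAGo flag expected_value rest)
         else if PySem.Str.startswith a flag && decide (PySem.Str.len flag < PySem.Str.len a) then
           (if PySem.Str.slice a (some (PySem.Str.len flag)) none = expected_value then true
            else pvAGo flag expected_value rest)
         else pvAGo flag expected_value rest) := rfl

-- A equals: some consecutive pair matches, or some arg passes the concatenated test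
theorem pvAGo_eq (flag expected_value : String) (l : List String) :
    pvAGo flag expected_value l
      = ((l.zip l.tail).any (fun p => p.1 == flag && p.2 == expected_value)
          || l.any (pvCM flag expected_value)) := by
  induction l with
  | nil => rfl
  | cons a rest ih =>
    rw [pvAGo_cons]
    by_cases hf : a = flag
    · subst hf
      cases rest with
      | nil => simp [pvAGo, pvCM, PySem.Str.len]
      | cons b t =>
        rw [ih]
        by_cases hb : b = expected_value <;>
          simp [hb, pvCM, PySem.Str.len, Bool.or_assoc, Bool.or_left_comm]
    · rw [ih]
      by_cases h1 : PySem.Chars.startswith a.toList flag.toList = true <;>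
      by_cases h2 : flag.length < a.length <;>
      by_cases hs : PySem.Str.slice a (some ((flag.length : Int))) none = expected_value <;>
      cases rest <;>
        simp [hf, h1, h2, hs, pvCM, beq_iff_eq, Bool.or_assoc, Bool.or_left_comm]

-- ===== VERDICT (by name: the statement is the Claim_ definition above) =====
theorem match_flag_with_value_py_spec : Claim_equal_match_flag_with_value_py := by
  intro args flag ev _
  unfold Spec_match_flag_with_value_py match_flag_with_value_py match_flag_with_value_py_alt
  have hcm : pvCM flag ev = fun arg => (decide (ev ≠ "") && (arg == flag ++ ev)) :=
    funext (pvCM_eq flag ev)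
  rw [pvAGo_eq, hcm]
  by_cases he : ev = "" <;>
    simp [he, Bool.or_comm, List.any_beq']
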